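-- pv_equiv track=rewrite | github.com/dmitry957/codewars-training | kata/6-kyu/vowel-shifting/solution.py | vowel_shift
-- ===== SOURCE A (Python) =====
-- def vowel_shift(text,n):
--     if not text:
--         return text
--     vowels = 'aeiouAEIOU'
--     indices = [i for i, char in enumerate(text) if char in vowels]
--     if not indices:
--         return text
--     vowel_chars = [text[i] for i in indices]
--     n = n % len(vowel_chars)
--     shifted = vowel_chars[-n:] + vowel_chars[:-n]
--     text_list = list(text)
--     for i, char in zip(indices, shifted):
--         text_list[i] = char
--     return ''.join(text_list)
-- ===== SOURCE B (Python) =====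
-- def vowel_shift(text, n):
--     vowels = 'aeiouAEIOU'
--     found = [c for c in text if c in vowels]
--     m = len(found)
--     if m == 0:
--         return text
--     out = []
--     j = 0
--     for c in text:
--         if c in vowels:
--             out.append(found[(j - n) % m])
--             j += 1
--         else:
--             out.append(c)
--     return ''.join(out)
-- ===== Notes on version B (the rewrite author's own statement) =====
-- stated objective: alternative
-- what changed: B drops A's index-list/zip writeback entirely: it computes the vowel list once and rebuilds the string in a single pass, replacing the j-th vowel by found[(j-n) % m] via modular indexing instead of slicing a rotated list and assigning back through an indices list.
import Mathlib
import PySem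

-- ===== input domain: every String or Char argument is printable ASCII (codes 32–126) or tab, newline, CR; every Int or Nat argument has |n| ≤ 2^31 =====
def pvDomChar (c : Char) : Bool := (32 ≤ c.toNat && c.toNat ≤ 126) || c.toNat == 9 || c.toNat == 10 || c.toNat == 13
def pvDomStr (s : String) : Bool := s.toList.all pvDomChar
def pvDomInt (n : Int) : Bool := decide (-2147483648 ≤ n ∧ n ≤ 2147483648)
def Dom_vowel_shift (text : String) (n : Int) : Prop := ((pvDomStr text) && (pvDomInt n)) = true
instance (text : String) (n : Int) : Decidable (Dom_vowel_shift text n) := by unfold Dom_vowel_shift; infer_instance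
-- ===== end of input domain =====

-- B rebuilds the string in one pass with modular indexing into the vowel list instead of
-- A's indices list + rotated-slice writeback; alternative decomposition, same O(n) cost.

-- ===== PORT A =====
def pvVowels : List Char := ['a', 'e', 'i', 'o', 'u', 'A', 'E', 'I', 'O', 'U']

def vowel_shift (text : String) (n : Int) : String :=
  let cs := text.toList
  if cs = [] then text else
  let indices : List Int :=
    (PySem.List.enumerate cs 0).filterMap (fun p => if pvVowels.contains p.2 then some p.1 else none)
  if indices = [] then text else
  -- every i in indices comes from enumerate, so text[i] never raises; getD ' ' is exact here
  let vowel_chars : List Char := indices.map (fun i => (PySem.List.pyGet? cs i).getD ' ')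
  let n' : Int := PySem.Int.mod n (vowel_chars.length : Int)
  let shifted : List Char :=
    PySem.List.slice vowel_chars (some (-n')) none ++ PySem.List.slice vowel_chars none (some (-n'))
  -- text_list[i] = char: i from enumerate is a valid nonnegative index, so List.set i.toNat is exact
  let text_list : List Char :=
    (indices.zip shifted).foldl (fun acc p => acc.set p.1.toNat p.2) cs
  String.mk text_list

-- ===== PORT B =====
def vowel_shift_alt (text : String) (n : Int) : String :=
  let cs := text.toList
  let found : List Char := cs.filter (fun c => pvVowels.contains c)
  let m : Int := (found.length : Int)
  if m = 0 then text else
  -- found[(j - n) % m]: 0 ≤ (j-n) % m < m, a valid index, so getD ' ' is exact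
  let out := cs.foldl
    (fun (st : List Char × Int) c =>
      if pvVowels.contains c then
        (st.1 ++ [PySem.List.pyGetD found (PySem.Int.mod (st.2 - n) m) ' '], st.2 + 1)
      else (st.1 ++ [c], st.2)) ([], 0)
  String.mk out.1

-- ===== PRECONDITION & SPEC =====
def Spec_vowel_shift (text : String) (n : Int) (out : String) : Prop := out = vowel_shift_alt text n
instance (text : String) (n : Int) (out : String) : Decidable (Spec_vowel_shift text n out) := by unfold Spec_vowel_shift; infer_instance

-- ===== CLAIM (what is proved, stated in full; the proofs are below) =====
def Claim_equal_vowel_shift : Prop := ∀ (text : String) (n : Int), Dom_vowel_shift text n → Spec_vowel_shift text n (vowel_shift text n)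

-- ===== LEMMAS AND PROOFS =====

-- A's list of vowel positions, as computed by the port
def pvIdxs (cs : List Char) (s : Int) : List Int :=
  (PySem.List.enumerate cs s).filterMap (fun p => if pvVowels.contains p.2 then some p.1 else none)

-- common "reinsert the replacement vowels in order" function
def pvRebuild : List Char → List Char → List Char
  | cs, [] => cs
  | [], _ :: _ => []
  | c :: t, s :: ss =>
      if pvVowels.contains c then s :: pvRebuild t ss else c :: pvRebuild t (s :: ss)

theorem pvIdxs_cons (c : Char) (cs : List Char) (s : Int) :
    pvIdxs (c :: cs) s =
      if pvVowels.contains c then s :: pvIdxs cs (s + 1) else pvIdxs cs (s + 1) := by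
  simp only [pvIdxs, PySem.List.enumerate_cons, List.filterMap_cons]
  by_cases hv : c ∈ pvVowels <;> simp [hv]

theorem pvIdxs_shift (cs : List Char) (s : Int) :
    pvIdxs cs (s + 1) = (pvIdxs cs s).map (· + 1) := by
  induction cs generalizing s with
  | nil => simp [pvIdxs]
  | cons c t ih =>
    rw [pvIdxs_cons, pvIdxs_cons]
    split <;> simp [ih]

theorem pvIdxs_nonneg (cs : List Char) (s : Int) (hs : 0 ≤ s) :
    ∀ i ∈ pvIdxs cs s, 0 ≤ i := by
  induction cs generalizing s with
  | nil => simp [pvIdxs]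
  | cons c t ih =>
    rw [pvIdxs_cons]
    split
    · intro i hi
      rcases List.mem_cons.mp hi with h | h
      · omega
      · exact ih (s + 1) (by omega) i h
    · exact ih (s + 1) (by omega)

theorem pvChars_eq (cs : List Char) :
    (pvIdxs cs 0).map (fun i => (PySem.List.pyGet? cs i).getD ' ')
      = cs.filter (fun c => pvVowels.contains c) := by
  induction cs with
  | nil => simp [pvIdxs]
  | cons c t ih =>
    rw [pvIdxs_cons]
    have hsh : pvIdxs t (0 + 1) = (pvIdxs t 0).map (· + 1) := pvIdxs_shift t 0
    have hmap : ∀ b : Bool, ((pvIdxs t 0).map (· + 1)).map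
        (fun i => (PySem.List.pyGet? (c :: t) i).getD ' ')
        = (pvIdxs t 0).map (fun i => (PySem.List.pyGet? t i).getD ' ') := by
      intro _
      rw [List.map_map]
      apply List.map_congr_left
      intro i hi
      have h0 : 0 ≤ i := pvIdxs_nonneg t 0 le_rfl i hi
      simp only [Function.comp]
      rw [PySem.List.pyGet?_of_nonneg _ (show (0:Int) ≤ i + 1 by omega), PySem.List.pyGet?_of_nonneg _ h0]
      have : (i + 1).toNat = i.toNat + 1 := by omega
      rw [this]
      simp
    split
    · rename_i hv
      simp only [List.map_cons, hsh, hmap true]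
      rw [List.filter_cons_of_pos hv, ih]
      congr 1
      simp
    · rename_i hv
      simp only [hsh, hmap false]
      rw [List.filter_cons_of_neg hv, ih]

-- writeback as A performs it
def pvWb (l : List Char) (ps : List (Int × Char)) : List Char :=
  ps.foldl (fun acc p => acc.set p.1.toNat p.2) l

theorem pvWb_shift (c : Char) (l : List Char) (ps : List (Int × Char))
    (h : ∀ p ∈ ps, 0 ≤ p.1) :
    pvWb (c :: l) (ps.map (fun p => (p.1 + 1, p.2))) = c :: pvWb l ps := by
  induction ps generalizing l with
  | nil => simp [pvWb]
  | cons p t ih =>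
    have hp : 0 ≤ p.1 := h p List.mem_cons_self
    have : (p.1 + 1).toNat = p.1.toNat + 1 := by omega
    simp only [pvWb, List.map_cons, List.foldl_cons, this, List.set_cons_succ]
    exact ih (l.set p.1.toNat p.2) (fun q hq => h q (List.mem_cons_of_mem _ hq))

theorem pvWb_rebuild (cs : List Char) (sh : List Char) :
    pvWb cs ((pvIdxs cs 0).zip sh) = pvRebuild cs sh := by
  induction cs generalizing sh with
  | nil =>
    cases sh <;> simp [pvIdxs, pvWb, pvRebuild]
  | cons c t ih =>
    rw [pvIdxs_cons]
    have hsh : pvIdxs t (0 + 1) = (pvIdxs t 0).map (· + 1) := pvIdxs_shift t 0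
    have hzip : ∀ ss : List Char,
        ((pvIdxs t 0).map (· + 1)).zip ss = ((pvIdxs t 0).zip ss).map (fun p => (p.1 + 1, p.2)) := by
      intro ss
      rw [List.zip_map_left]
      rfl
    have hnn : ∀ ss : List Char, ∀ p ∈ (pvIdxs t 0).zip ss, 0 ≤ p.1 := by
      intro ss p hp
      exact pvIdxs_nonneg t 0 le_rfl p.1 (List.of_mem_zip hp).1
    split
    · rename_i hv
      cases sh with
      | nil => simp [pvWb, pvRebuild]
      | cons s ss =>
        simp only [List.zip_cons_cons, hsh, hzip ss]
        simp only [pvWb, List.foldl_cons]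
        have h0 : (0 : Int).toNat = 0 := rfl
        rw [show ((0:Int).toNat) = 0 from rfl]
        simp only [List.set_cons_zero]
        have := pvWb_shift s t ((pvIdxs t 0).zip ss) (hnn ss)
        simp only [pvWb] at this ih ⊢
        rw [this, ih ss]
        simp only [pvRebuild]
        rw [if_pos hv]
    · rename_i hv
      cases sh with
      | nil => simp [pvWb, pvRebuild]
      | cons s ss =>
        rw [hsh, hzip (s :: ss)]
        rw [pvWb_shift c t _ (hnn (s :: ss)), ih (s :: ss)]
        simp only [pvRebuild]
        rw [if_neg hv]

-- rotation arithmetic: the j-th element of A's rotated list is found[(j - n) % m]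
theorem pvShift_eq (found : List Char) (n : Int) (hne : found ≠ []) :
    PySem.List.slice found (some (-(PySem.Int.mod n (found.length : Int)))) none ++
      PySem.List.slice found none (some (-(PySem.Int.mod n (found.length : Int))))
    = found.drop (found.length - (PySem.Int.mod n (found.length : Int)).toNat) ++
      found.take (found.length - (PySem.Int.mod n (found.length : Int)).toNat) := by
  have hm : 0 < found.length := List.length_pos_iff.mpr hne
  set n' : Int := PySem.Int.mod n (found.length : Int) with hn'
  have hm' : (0 : Int) < (found.length : Int) := by exact_mod_cast hm
  have hmod : n' = n % (found.length : Int) := by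
    rw [hn', PySem.Int.mod_eq_emod_of_pos hm']
  have h0 : 0 ≤ n' := by rw [hmod]; exact Int.emod_nonneg n (by omega)
  have hlt : n' < (found.length : Int) := by
    rw [hmod]; exact Int.emod_lt_of_pos n hm'
  by_cases hz : n' = 0
  · rw [hz]
    norm_num
    rw [PySem.List.slice_to found (show (0:Int) ≤ 0 by omega)]
    simp
  · have hk : 0 < n'.toNat := by omega
    rw [show (-n') = -((n'.toNat : Nat) : Int) by omega]
    rw [PySem.List.slice_from_neg_natCast _ _ hk, PySem.List.slice_to_neg_natCast _ _ hk]

theorem pvRot_index (found : List Char) (n : Int) (j : Nat) (hne : found ≠ [])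
    (hj : j < found.length) :
    (found.drop (found.length - (PySem.Int.mod n (found.length : Int)).toNat) ++
      found.take (found.length - (PySem.Int.mod n (found.length : Int)).toNat))[j]'(by
        simp; omega)
    = PySem.List.pyGetD found (PySem.Int.mod ((j : Int) - n) (found.length : Int)) ' ' := by
  have hm : 0 < found.length := List.length_pos_iff.mpr hne
  have hm' : (0 : Int) < (found.length : Int) := by exact_mod_cast hm
  set n' : Int := PySem.Int.mod n (found.length : Int) with hn'
  have hmod : n' = n % (found.length : Int) := PySem.Int.mod_eq_emod_of_pos hm'
  have h0 : 0 ≤ n' := by rw [hmod]; exact Int.emod_nonneg n (by omega)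
  have hlt : n' < (found.length : Int) := by rw [hmod]; exact Int.emod_lt_of_pos n hm'
  set e : Int := PySem.Int.mod ((j : Int) - n) (found.length : Int) with he
  have hemod : e = ((j : Int) - n) % (found.length : Int) := PySem.Int.mod_eq_emod_of_pos hm'
  have he0 : 0 ≤ e := by rw [hemod]; exact Int.emod_nonneg _ (by omega)
  have helt : e < (found.length : Int) := by rw [hemod]; exact Int.emod_lt_of_pos _ hm'
  have hsub : e = ((j : Int) - n') % (found.length : Int) := by
    rw [hemod, hmod, Int.sub_emod ((j : Int)) n, Int.sub_emod ((j : Int)) (n % (found.length : Int)),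
      Int.emod_emod_of_dvd n dvd_rfl]
  have hval : e = if (j : Int) < n' then (j : Int) - n' + (found.length : Int) else (j : Int) - n' := by
    split
    · rename_i hlt'
      rw [hsub]
      conv_lhs => rw [show (j : Int) - n' = ((j : Int) - n' + (found.length : Int)) - (found.length : Int) by ring]
      rw [Int.sub_emod_right]
      exact Int.emod_eq_of_lt (by omega) (by omega)
    · rename_i hge
      rw [hsub]
      exact Int.emod_eq_of_lt (by omega) (by omega)
  have hdl : (List.drop (found.length - n'.toNat) found).length = n'.toNat := by
    simp
    omega
  rw [PySem.List.pyGetD_eq_getElem found ' ' he0 (by exact_mod_cast helt)]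
  by_cases hcase : j < n'.toNat
  · have hv : e = (j : Int) - n' + (found.length : Int) := by
      rw [hval]; rw [if_pos (show (j : Int) < n' by omega)]
    rw [List.getElem_append_left (by omega)]
    rw [List.getElem_drop]
    congr 1
    omega
  · have hv : e = (j : Int) - n' := by
      rw [hval]; rw [if_neg (show ¬ (j : Int) < n' by omega)]
    rw [List.getElem_append_right (by omega)]
    rw [List.getElem_take]
    congr 1
    omega

theorem pvCountP_cons (c : Char) (t : List Char) :
    (c :: t).countP (fun c => pvVowels.contains c)
      = (if pvVowels.contains c = true then 1 else 0) + t.countP (fun c => pvVowels.contains c) := by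
  rw [List.countP_cons]
  by_cases hv : pvVowels.contains c = true
  · rw [if_pos hv]; omega
  · rw [if_neg hv]; omega

-- B's fold equals pvRebuild of the (dropped) rotated list
theorem pvAlt_fold (found : List Char) (n : Int) (_hne : found ≠ [])
    (sh : List Char) (hshlen : sh.length = found.length)
    (hsh : ∀ (j : Nat) (hj : j < found.length),
      sh[j]'(by omega) = PySem.List.pyGetD found (PySem.Int.mod ((j : Int) - n) (found.length : Int)) ' ') :
    ∀ (cs : List Char) (j : Nat) (acc : List Char),
      j + cs.countP (fun c => pvVowels.contains c) ≤ found.length →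
      (cs.foldl (fun (st : List Char × Int) c =>
        if pvVowels.contains c then
          (st.1 ++ [PySem.List.pyGetD found (PySem.Int.mod (st.2 - n) (found.length : Int)) ' '], st.2 + 1)
        else (st.1 ++ [c], st.2)) (acc, (j : Int))).1
      = acc ++ pvRebuild cs (sh.drop j) := by
  intro cs
  induction cs with
  | nil =>
    intro j acc _
    cases hdrop : sh.drop j <;> simp [pvRebuild]
  | cons c t ih =>
    intro j acc hcnt
    simp only [List.foldl_cons]
    by_cases hv : pvVowels.contains c
    · have hcnt' : j + 1 + t.countP (fun c => pvVowels.contains c) ≤ found.length := by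
        rw [pvCountP_cons, if_pos hv] at hcnt; omega
      have hjlt : j < found.length := by omega
      have hdrop : sh.drop j = sh[j]'(by omega) :: sh.drop (j + 1) :=
        List.drop_eq_getElem_cons (by omega)
      rw [if_pos hv]
      have hcast : ((j : Int) + 1) = ((j + 1 : Nat) : Int) := by push_cast; ring
      rw [hcast, ih (j + 1)
        (acc ++ [PySem.List.pyGetD found (PySem.Int.mod ((j : Int) - n) (found.length : Int)) ' '])
        (by omega)]
      have hrb : pvRebuild (c :: t) (sh[j]'(by omega) :: sh.drop (j + 1))
          = sh[j]'(by omega) :: pvRebuild t (sh.drop (j + 1)) := by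
        simp only [pvRebuild]; rw [if_pos hv]
      rw [hdrop, hrb, hsh j hjlt]
      simp
    · rw [if_neg hv]
      rw [ih j (acc ++ [c]) (by rw [pvCountP_cons, if_neg hv] at hcnt; omega)]
      cases hdrop : sh.drop j with
      | nil => simp [pvRebuild]
      | cons s ss =>
        have hrb : pvRebuild (c :: t) (s :: ss) = c :: pvRebuild t (s :: ss) := by
          simp only [pvRebuild]; rw [if_neg hv]
        rw [hrb]
        simp

-- A's writeback equals pvRebuild of the rotated list
theorem pvA_eq (cs : List Char) (sh : List Char) :
    pvWb cs ((pvIdxs cs 0).zip sh) = pvRebuild cs sh := pvWb_rebuild cs sh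

-- indices empty iff no vowels
theorem pvIdxs_nil_iff (cs : List Char) (s : Int) :
    pvIdxs cs s = [] ↔ cs.filter (fun c => pvVowels.contains c) = [] := by
  induction cs generalizing s with
  | nil => simp [pvIdxs]
  | cons c t ih =>
    rw [pvIdxs_cons]
    by_cases hv : c ∈ pvVowels <;> simp [hv, ih]

-- ===== VERDICT (by name: the statement is the Claim_ definition above) =====
theorem vowel_shift_spec : Claim_equal_vowel_shift := by
  unfold Claim_equal_vowel_shift
  intro text n _
  unfold Spec_vowel_shift vowel_shift vowel_shift_alt
  set cs := text.toList with hcs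
  set found := cs.filter (fun c => pvVowels.contains c) with hfound
  by_cases hnil : cs = []
  · rw [if_pos hnil]
    rw [if_pos (by rw [hnil]; simp)]
  · rw [if_neg hnil]
    have hid : List.filterMap (fun p => if pvVowels.contains p.2 = true then some p.1 else none)
        (PySem.List.enumerate cs) = pvIdxs cs 0 := rfl
    rw [hid]
    by_cases hidx : pvIdxs cs 0 = []
    · have hf : found = [] := (pvIdxs_nil_iff cs 0).mp hidx
      rw [if_pos hidx]
      rw [if_pos (by rw [hfound] at hf; rw [hf]; simp)]
    · have hf : found ≠ [] := fun h => hidx ((pvIdxs_nil_iff cs 0).mpr (hfound ▸ h))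
      have hm : 0 < found.length := List.length_pos_iff.mpr hf
      rw [if_neg hidx]
      rw [if_neg (show ¬ ((found.length : Int) = 0) by exact_mod_cast (by omega : ¬ found.length = 0))]
      rw [pvChars_eq cs]
      rw [← hfound]
      show String.mk (List.foldl (fun acc p => acc.set p.1.toNat p.2) cs ((pvIdxs cs 0).zip
            (PySem.List.slice found (some (-(PySem.Int.mod n (found.length : Int)))) none ++
             PySem.List.slice found none (some (-(PySem.Int.mod n (found.length : Int)))))))
          = String.mk (List.foldl (fun (st : List Char × Int) c => if pvVowels.contains c = true then
              (st.1 ++ [PySem.List.pyGetD found (PySem.Int.mod (st.2 - n) (found.length : Int)) ' '], st.2 + 1)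
            else (st.1 ++ [c], st.2)) ([], 0) cs).1
      rw [pvShift_eq found n hf]
      set sh := found.drop (found.length - (PySem.Int.mod n (found.length : Int)).toNat) ++
        found.take (found.length - (PySem.Int.mod n (found.length : Int)).toNat) with hsh
      have hshlen : sh.length = found.length := by simp [hsh]
      have hshval : ∀ (j : Nat) (hj : j < found.length),
          sh[j]'(by omega) = PySem.List.pyGetD found (PySem.Int.mod ((j : Int) - n) (found.length : Int)) ' ' := by
        intro j hj
        exact pvRot_index found n j hf hj
      have hB := pvAlt_fold found n hf sh hshlen hshval cs 0 []
        (by rw [List.countP_eq_length_filter, ← hfound]; omega)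
      have hA := pvA_eq cs sh
      simp only [pvWb] at hA
      rw [hA]
      simp only [Nat.cast_zero, List.drop_zero, List.nil_append] at hB
      rw [hB]
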